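-- pv_equiv track=rewrite | github.com/jcolinpatrick/kryptos | scripts/e_s_61_noncolumnar_width7.py | myszkowski_perm
-- ===== SOURCE A (Python) =====
-- def myszkowski_perm(keyword, text_len):
--     """Myszkowski transposition: repeated letters in keyword read simultaneously.
--
--     E.g., keyword TOMATO → T=1,O=2,M=3,A=4,T=1,O=2
--     Columns with same number are read left-to-right simultaneously.
--     """
--     width = len(keyword)
--     n_rows = (text_len + width - 1) // width
--
--     # Assign column ranks (same letter → same rank)
--     unique_sorted = sorted(set(keyword))
--     rank_map = {c: i for i, c in enumerate(unique_sorted)}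
--     col_ranks = [rank_map[c] for c in keyword]
--
--     # Group columns by rank
--     rank_to_cols = {}
--     for col, rank in enumerate(col_ranks):
--         if rank not in rank_to_cols:
--             rank_to_cols[rank] = []
--         rank_to_cols[rank].append(col)
--
--     perm = []
--     for rank in sorted(rank_to_cols.keys()):
--         cols = rank_to_cols[rank]
--         if len(cols) == 1:
--             # Single column: read top to bottom
--             col = cols[0]
--             for row in range(n_rows):
--                 pos = row * width + col
--                 if pos < text_len:
--                     perm.append(pos)
--         else:
--             # Multiple columns: read row by row across all same-rank columns
--             for row in range(n_rows):
--                 for col in cols: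
--                     pos = row * width + col
--                     if pos < text_len:
--                         perm.append(pos)
--
--     return perm
-- ===== SOURCE B (Python) =====
-- def myszkowski_perm(keyword, text_len):
--     """Myszkowski transposition permutation via one sort.
--
--     Read order is (column rank, row, column); for a position p (row = p //
--     width, col = p % width) that order is exactly the order of the integer
--     col_ranks[p % width] * text_len + p, because 0 <= p < text_len.
--     """
--     width = len(keyword)
--     rank_map = {c: i for i, c in enumerate(sorted(set(keyword)))}
--     col_ranks = [rank_map[c] for c in keyword]
--     return sorted(range(text_len), key=lambda p: col_ranks[p % width] * text_len + p)
-- ===== Notes on version B (the rewrite author's own statement) =====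
-- stated objective: simpler
-- what changed: Replaces the rank-bucket dictionary plus per-rank row loops (with a redundant single-vs-multi-column branch) by a single sort of range(text_len) under the key col_ranks[p % width] * text_len + p, which encodes exactly A's (rank, row, column) read order.
import Mathlib
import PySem

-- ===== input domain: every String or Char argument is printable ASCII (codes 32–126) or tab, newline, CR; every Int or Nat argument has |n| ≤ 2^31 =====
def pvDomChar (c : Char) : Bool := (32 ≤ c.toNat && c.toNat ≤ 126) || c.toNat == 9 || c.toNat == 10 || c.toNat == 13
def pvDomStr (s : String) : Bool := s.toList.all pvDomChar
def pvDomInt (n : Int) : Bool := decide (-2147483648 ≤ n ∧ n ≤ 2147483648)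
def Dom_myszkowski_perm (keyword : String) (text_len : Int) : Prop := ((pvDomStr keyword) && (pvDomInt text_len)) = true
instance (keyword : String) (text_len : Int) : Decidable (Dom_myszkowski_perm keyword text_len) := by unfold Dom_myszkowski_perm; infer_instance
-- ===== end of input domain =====

-- B replaces A's rank-bucket dictionary and per-rank row loops by one sort of range(text_len)
-- under an integer key encoding A's (rank, row, column) read order — simpler, not faster.

-- ===== PORT A =====
def myszkowski_perm (keyword : String) (text_len : Int) : List Int :=
  let kw := keyword.toList
  let width : Int := PySem.Str.len keyword
  let n_rows : Int := PySem.Int.floordiv (text_len + width - 1) width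
  let unique_sorted : List Char := PySem.List.sorted (PySem.Set.ofList kw) (fun c => c)
  let rank_map : PySem.Dict Char Int :=
    (PySem.List.enumerate unique_sorted).foldl (fun d ic => d.insert ic.2 ic.1) PySem.Dict.empty
  -- rank_map[c]: the key is always present, so the lookup is getD
  let col_ranks : List Int := kw.map (fun c => rank_map.getD c 0)
  let rank_to_cols : PySem.Dict Int (List Int) :=
    (PySem.List.enumerate col_ranks).foldl
      (fun d cr =>
        let d' := if d.contains cr.2 then d else d.insert cr.2 []
        d'.modify cr.2 [] (fun l => l ++ [cr.1]))
      PySem.Dict.empty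
  (PySem.List.sorted rank_to_cols.keys (fun r => r)).foldl
    (fun perm rank =>
      let cols := rank_to_cols.getD rank []
      if cols.length == 1 then
        let col := PySem.List.pyGetD cols 0 0
        (PySem.List.pyRange 0 n_rows 1).foldl
          (fun perm row =>
            let pos := row * width + col
            if pos < text_len then perm ++ [pos] else perm) perm
      else
        (PySem.List.pyRange 0 n_rows 1).foldl
          (fun perm row =>
            cols.foldl (fun perm col =>
              let pos := row * width + col
              if pos < text_len then perm ++ [pos] else perm) perm) perm)
    []

-- ===== PORT B =====
def myszkowski_perm_alt (keyword : String) (text_len : Int) : List Int :=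
  let kw := keyword.toList
  let width : Int := PySem.Str.len keyword
  let rank_map : PySem.Dict Char Int :=
    (PySem.List.enumerate (PySem.List.sorted (PySem.Set.ofList kw) (fun c => c))).foldl
      (fun d ic => d.insert ic.2 ic.1) PySem.Dict.empty
  let col_ranks : List Int := kw.map (fun c => rank_map.getD c 0)
  PySem.List.sorted (PySem.List.pyRange 0 text_len 1)
    (fun p => PySem.List.pyGetD col_ranks (PySem.Int.mod p width) 0 * text_len + p)

-- ===== PRECONDITION & SPEC =====
-- A divides by len(keyword) eagerly, so it raises ZeroDivisionError exactly when keyword = "".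
def Pre_myszkowski_perm (keyword : String) (text_len : Int) : Prop := keyword ≠ ""
instance (keyword : String) (text_len : Int) : Decidable (Pre_myszkowski_perm keyword text_len) := by unfold Pre_myszkowski_perm; infer_instance
def pvWitness_myszkowski_perm : String × Int := ("TOMATO", 17)


def Spec_myszkowski_perm (keyword : String) (text_len : Int) (out : List Int) : Prop := out = myszkowski_perm_alt keyword text_len
instance (keyword : String) (text_len : Int) (out : List Int) : Decidable (Spec_myszkowski_perm keyword text_len out) := by unfold Spec_myszkowski_perm; infer_instance

-- ===== CLAIM (what is proved, stated in full; the proofs are below) =====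
def Claim_equal_myszkowski_perm : Prop := ∀ (keyword : String) (text_len : Int), Dom_myszkowski_perm keyword text_len → Pre_myszkowski_perm keyword text_len → Spec_myszkowski_perm keyword text_len (myszkowski_perm keyword text_len)

-- ===== LEMMAS AND PROOFS =====

-- ----- proof-local definitions (used only by the proofs below) -----

-- the shared col_ranks value both ports compute
def pvRanks (keyword : String) : List Int :=
  let kw := keyword.toList
  let rank_map : PySem.Dict Char Int :=
    (PySem.List.enumerate (PySem.List.sorted (PySem.Set.ofList kw) (fun c => c))).foldl
      (fun d ic => d.insert ic.2 ic.1) PySem.Dict.empty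
  kw.map (fun c => rank_map.getD c 0)

def pvKey (ranks : List Int) (w L p : Int) : Int :=
  PySem.List.pyGetD ranks (PySem.Int.mod p w) 0 * L + p

-- the ordered list of columns of a given rank
def pvCols (ranks : List Int) (r : Int) : List Int :=
  ((PySem.List.enumerate ranks).filter (fun cr => cr.2 == r)).map (fun cr => cr.1)

-- the positions A emits for one rank group
def pvBlock (w L nr : Int) (cols : List Int) : List Int :=
  (PySem.List.pyRange 0 nr 1).flatMap
    (fun row => (cols.filter (fun col => decide (row * w + col < L))).map (fun col => row * w + col))

def pvStep (d : PySem.Dict Int (List Int)) (cr : Int × Int) : PySem.Dict Int (List Int) :=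
  let d' := if d.contains cr.2 then d else d.insert cr.2 []
  d'.modify cr.2 [] (fun l => l ++ [cr.1])

theorem pvStep_getD (d : PySem.Dict Int (List Int)) (c r r' : Int) :
    (pvStep d (c, r)).getD r' [] = d.getD r' [] ++ (if r = r' then [c] else []) := by
  unfold pvStep PySem.Dict.modify
  by_cases hc : d.contains r = true
  · simp only [hc, if_true]
    rw [PySem.Dict.getD_insert]
    by_cases h : r' = r
    · subst h; simp
    · simp [h, Ne.symm h]
  · simp only [hc, if_false, Bool.false_eq_true]
    rw [PySem.Dict.getD_insert, PySem.Dict.getD_insert]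
    have h0 : d.getD r [] = ([] : List Int) := by
      unfold PySem.Dict.getD
      rw [(PySem.Dict.get?_eq_none_iff_contains d r).mpr (by simpa using hc)]
      rfl
    by_cases h : r' = r
    · subst h; simp [h0]
    · rw [PySem.Dict.getD_insert]; simp [h, Ne.symm h]

theorem pvFold_getD (e : List (Int × Int)) (d : PySem.Dict Int (List Int)) (r' : Int) :
    (e.foldl pvStep d).getD r' [] =
      d.getD r' [] ++ (e.filter (fun cr => cr.2 == r')).map (fun cr => cr.1) := by
  induction e generalizing d with
  | nil => simp
  | cons hd tl ih =>
    obtain ⟨c, r⟩ := hd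
    rw [List.foldl_cons, ih, pvStep_getD]
    by_cases h : r = r'
    · subst h; simp
    · simp [h]

theorem pvStep_keys (d : PySem.Dict Int (List Int)) (c r : Int) :
    (pvStep d (c, r)).keys = if r ∈ d.keys then d.keys else d.keys ++ [r] := by
  unfold pvStep PySem.Dict.modify
  by_cases hm : r ∈ d.keys
  · rw [PySem.Dict.contains_eq_decide_mem_keys]
    simp only [hm, decide_true, if_true]
    rw [PySem.Dict.keys_insert_of_contains _ _
      (by rw [PySem.Dict.contains_eq_decide_mem_keys]; simpa using hm)]
  · rw [PySem.Dict.contains_eq_decide_mem_keys]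
    simp only [hm, decide_false, Bool.false_eq_true, if_false]
    rw [PySem.Dict.keys_insert_of_contains _ _
      (by rw [PySem.Dict.contains_eq_decide_mem_keys]; simp [PySem.Dict.mem_keys_insert])]
    rw [PySem.Dict.keys_insert_of_not_contains _ _
      (by rw [PySem.Dict.contains_eq_decide_mem_keys]; simpa using hm)]

theorem pvFold_keys_mem (e : List (Int × Int)) (d : PySem.Dict Int (List Int)) (r : Int) :
    (r ∈ (e.foldl pvStep d).keys) ↔ (r ∈ d.keys ∨ r ∈ e.map (fun cr => cr.2)) := by
  induction e generalizing d with
  | nil => simp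
  | cons hd tl ih =>
    rw [List.foldl_cons, ih]
    have : pvStep d hd = pvStep d (hd.1, hd.2) := by rfl
    rw [this, pvStep_keys]
    by_cases hm : hd.2 ∈ d.keys
    · simp only [hm, if_true, List.map_cons, List.mem_cons]
      constructor
      · rintro (h | h); exact Or.inl h; exact Or.inr (Or.inr h)
      · rintro (h | h | h)
        · exact Or.inl h
        · exact Or.inl (h ▸ hm)
        · exact Or.inr h
    · simp only [hm, if_false, List.map_cons, List.mem_cons, List.mem_append]
      tauto

theorem pvFold_keys_nodup (e : List (Int × Int)) (d : PySem.Dict Int (List Int))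
    (h : d.keys.Nodup) : (e.foldl pvStep d).keys.Nodup := by
  induction e generalizing d with
  | nil => exact h
  | cons hd tl ih =>
    rw [List.foldl_cons]
    apply ih
    have : pvStep d hd = pvStep d (hd.1, hd.2) := by rfl
    rw [this, pvStep_keys]
    by_cases hm : hd.2 ∈ d.keys
    · simpa [hm] using h
    · simp only [hm, if_false]
      simp only [List.nodup_append, h, true_and]
      constructor
      · simp
      · intro a ha b hb
        simp only [List.mem_singleton] at hb
        subst hb; intro hab; exact hm (hab ▸ ha)


-- A's code from the grouping loop on, abstracted over col_ranks/width
def pvATail (ranks : List Int) (width text_len : Int) : List Int :=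
  let n_rows : Int := PySem.Int.floordiv (text_len + width - 1) width
  let rank_to_cols : PySem.Dict Int (List Int) :=
    (PySem.List.enumerate ranks).foldl pvStep PySem.Dict.empty
  (PySem.List.sorted rank_to_cols.keys (fun r => r)).foldl
    (fun perm rank =>
      let cols := rank_to_cols.getD rank []
      if cols.length == 1 then
        let col := PySem.List.pyGetD cols 0 0
        (PySem.List.pyRange 0 n_rows 1).foldl
          (fun perm row =>
            let pos := row * width + col
            if pos < text_len then perm ++ [pos] else perm) perm
      else
        (PySem.List.pyRange 0 n_rows 1).foldl
          (fun perm row =>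
            cols.foldl (fun perm col =>
              let pos := row * width + col
              if pos < text_len then perm ++ [pos] else perm) perm) perm)
    []

-- ----- bridges: the ports are definitionally the abstracted pieces -----

theorem pvA_eq (keyword : String) (text_len : Int) :
    myszkowski_perm keyword text_len = pvATail (pvRanks keyword) (PySem.Str.len keyword) text_len := rfl

theorem pvB_eq (keyword : String) (text_len : Int) :
    myszkowski_perm_alt keyword text_len =
      PySem.List.sorted (PySem.List.pyRange 0 text_len 1)
        (fun p => pvKey (pvRanks keyword) (PySem.Str.len keyword) text_len p) := rfl

theorem pvFlatMap_singleton (p : Int → Bool) (f : Int → Int) (l : List Int) :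
    l.flatMap (fun x => if p x then [f x] else []) = (l.filter p).map f := by
  induction l with
  | nil => simp
  | cons x xs ih =>
    by_cases h : p x <;> simp [h, ih]

theorem pvBody_eq (w L nr : Int) (cols : List Int) (perm : List Int) :
    (if cols.length == 1 then
        (PySem.List.pyRange 0 nr 1).foldl
          (fun perm row =>
            let pos := row * w + PySem.List.pyGetD cols 0 0
            if pos < L then perm ++ [pos] else perm) perm
      else
        (PySem.List.pyRange 0 nr 1).foldl
          (fun perm row =>
            cols.foldl (fun perm col =>
              let pos := row * w + col
              if pos < L then perm ++ [pos] else perm) perm) perm)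
    = perm ++ pvBlock w L nr cols := by
  by_cases h1 : cols.length == 1
  · simp only [h1, if_true]
    obtain ⟨a, rfl⟩ := List.length_eq_one_iff.mp (by simpa using h1)
    have ha : PySem.List.pyGetD [a] 0 0 = a := by
      rw [PySem.List.pyGetD_of_nonneg _ _ le_rfl]; rfl
    rw [ha]
    rw [PySem.List.foldl_append_ite (fun row => row * w + a < L) (fun row => row * w + a)]
    unfold pvBlock
    congr 1
    have hfun : (fun row => (([a].filter (fun col => decide (row * w + col < L))).map
          (fun col => row * w + col)))
        = (fun row => if decide (row * w + a < L) then [row * w + a] else []) := by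
      funext row
      by_cases h : row * w + a < L <;> simp [h]
    rw [hfun, pvFlatMap_singleton (fun row => decide (row * w + a < L)) (fun row => row * w + a)]
  · simp only [h1]
    rw [PySem.List.foldl_congr_mem _ _
        (fun perm row => perm ++ (cols.filter (fun col => decide (row * w + col < L))).map (fun col => row * w + col)) _
        (fun acc row _ => PySem.List.foldl_append_ite (fun col => row * w + col < L) (fun col => row * w + col) cols acc)]
    rw [PySem.List.foldl_append_eq_flatMap]
    rfl

theorem pvCols_mem (ranks : List Int) (r c : Int) :
    c ∈ pvCols ranks r ↔ ∃ (k : Nat) (h : k < ranks.length), c = (k : Int) ∧ ranks[k] = r := by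
  simp only [pvCols, List.mem_map, List.mem_filter, PySem.List.mem_enumerate_iff]
  constructor
  · rintro ⟨cr, ⟨⟨k, hk, rfl⟩, h2⟩, rfl⟩
    simp only [beq_iff_eq] at h2
    exact ⟨k, hk, by simpa using h2 ▸ rfl, by simpa using h2⟩
  · rintro ⟨k, hk, rfl, hr⟩
    exact ⟨((k : Int), r), ⟨⟨k, hk, by simp [hr]⟩, by simp⟩, rfl⟩

theorem pvCols_pairwise (ranks : List Int) (r : Int) :
    (pvCols ranks r).Pairwise (· < ·) := by
  unfold pvCols
  rw [List.pairwise_map]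
  exact (PySem.List.pairwise_lt_enumerate ranks 0).filter _

-- bounds of cols elements

theorem pvCols_bound (ranks : List Int) (r c : Int) (h : c ∈ pvCols ranks r) :
    0 ≤ c ∧ c < (ranks.length : Int) := by
  obtain ⟨k, hk, rfl, _⟩ := (pvCols_mem ranks r c).mp h
  exact ⟨Int.natCast_nonneg k, by exact_mod_cast hk⟩

theorem pvBlock_mem (ranks : List Int) (w L r p : Int)
    (hw : (ranks.length : Int) = w) (hpos : 0 < w) :
    p ∈ pvBlock w L (PySem.Int.floordiv (L + w - 1) w) (pvCols ranks r) ↔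
      0 ≤ p ∧ p < L ∧ PySem.List.pyGetD ranks (PySem.Int.mod p w) 0 = r := by
  have hw0 : w ≠ 0 := ne_of_gt hpos
  rw [PySem.Int.floordiv_eq_ediv_of_pos hpos]
  simp only [pvBlock, List.mem_flatMap, List.mem_map, List.mem_filter,
    PySem.List.mem_pyRange_one, decide_eq_true_eq]
  constructor
  · rintro ⟨row, ⟨hr0, hrnr⟩, col, ⟨hcol, hlt⟩, rfl⟩
    obtain ⟨hc0, hcw⟩ := pvCols_bound ranks r col hcol
    rw [hw] at hcw
    obtain ⟨k, hk, hck, hkr⟩ := (pvCols_mem ranks r col).mp hcol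
    have hp0 : 0 ≤ row * w + col := by positivity
    refine ⟨hp0, hlt, ?_⟩
    have hmod : PySem.Int.mod (row * w + col) w = col := by
      rw [PySem.Int.mod_eq_emod_of_pos hpos]
      rw [add_comm, mul_comm, Int.add_mul_emod_self_left]
      exact Int.emod_eq_of_lt hc0 hcw
    rw [hmod, PySem.List.pyGetD_of_nonneg _ _ hc0, hck]
    have : ((k : Int)).toNat = k := Int.toNat_natCast k
    rw [this, List.getD_eq_getElem ranks 0 hk]
    exact hkr
  · rintro ⟨hp0, hpL, hget⟩
    have hL0 : 0 < L := lt_of_le_of_lt hp0 hpL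
    rw [PySem.Int.mod_eq_emod_of_pos hpos] at hget
    set col := p % w with hcol
    set row := p / w with hrow
    have hc0 : 0 ≤ col := Int.emod_nonneg p hw0
    have hcw : col < w := Int.emod_lt_of_pos p hpos
    rw [PySem.List.pyGetD_of_nonneg _ _ hc0] at hget
    have hlen : col.toNat < ranks.length := by rw [← hw] at hcw; omega
    refine ⟨row, ⟨Int.ediv_nonneg hp0 (le_of_lt hpos), ?_⟩, col, ⟨?_, ?_⟩, ?_⟩
    · -- row < (L + w - 1) / w
      have h1 : (L + w - 1) / w = (L - 1) / w + 1 := by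
        have : L + w - 1 = (L - 1) + 1 * w := by ring
        rw [this, Int.add_mul_ediv_right _ _ hw0]
      rw [h1]
      have : row ≤ (L - 1) / w := Int.ediv_le_ediv hpos (by omega)
      omega
    · -- col ∈ pvCols ranks r
      rw [pvCols_mem]
      refine ⟨col.toNat, ?_, ?_, ?_⟩
      · exact hlen
      · omega
      · rw [← hget, List.getD_eq_getElem ranks 0 hlen]
    · -- filter condition: decide (row * w + col < L)
      have : row * w + col = p := by
        rw [hrow, hcol, mul_comm, Int.ediv_add_emod p w]
      rw [this]; exact hpL
    · rw [hrow, hcol, mul_comm, Int.ediv_add_emod p w]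

theorem pvRange_pairwise (L : Int) : (PySem.List.pyRange 0 L 1).Pairwise (· < ·) := by
  have h : PySem.List.pyRange 0 L 1
      = List.map (fun k : Nat => (k : Int)) (List.range (if 0 < L then L.toNat else 0)) := by
    unfold PySem.List.pyRange; simp
  rw [h, List.pairwise_map]
  refine List.Pairwise.imp ?_ List.pairwise_lt_range
  intro a b hab
  exact_mod_cast hab

theorem pvBlock_pairwise (ranks : List Int) (w L nr r : Int)
    (hw : (ranks.length : Int) = w) (hpos : 0 < w) :
    (pvBlock w L nr (pvCols ranks r)).Pairwise (· < ·) := by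
  unfold pvBlock
  rw [List.pairwise_flatMap]
  constructor
  · intro row _
    rw [List.pairwise_map]
    refine List.Pairwise.imp ?_ ((pvCols_pairwise ranks r).filter _)
    intro a b hab; omega
  · refine List.Pairwise.imp_of_mem ?_ (pvRange_pairwise nr)
    intro r1 r2 hm1 hm2 hlt x hx y hy
    simp only [List.mem_map, List.mem_filter] at hx hy
    obtain ⟨c1, ⟨hc1, _⟩, rfl⟩ := hx
    obtain ⟨c2, ⟨hc2, _⟩, rfl⟩ := hy
    obtain ⟨h10, h1w⟩ := pvCols_bound ranks r c1 hc1
    obtain ⟨h20, h2w⟩ := pvCols_bound ranks r c2 hc2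
    rw [hw] at h1w h2w
    have hr2 : r1 + 1 ≤ r2 := hlt
    have h1 : r1 * w + c1 < (r1 + 1) * w := by nlinarith
    have h2 : (r1 + 1) * w ≤ r2 * w := by nlinarith
    nlinarith

theorem pvATail_eq_flatMap (ranks : List Int) (w L : Int) :
    pvATail ranks w L =
      (PySem.List.sorted
        (((PySem.List.enumerate ranks).foldl pvStep PySem.Dict.empty).keys) (fun r => r)).flatMap
        (fun r => pvBlock w L (PySem.Int.floordiv (L + w - 1) w) (pvCols ranks r)) := by
  unfold pvATail
  rw [PySem.List.foldl_congr_mem _ _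
      (fun perm rank => perm ++ pvBlock w L (PySem.Int.floordiv (L + w - 1) w) (pvCols ranks rank)) _
      (by
        intro acc rank _
        have hd : ((PySem.List.enumerate ranks).foldl pvStep PySem.Dict.empty).getD rank []
            = pvCols ranks rank := by
          rw [pvFold_getD]
          simp [pvCols, PySem.Dict.getD_empty]
        simp only [hd]
        exact pvBody_eq w L _ (pvCols ranks rank) acc)]
  rw [PySem.List.foldl_append_eq_flatMap]
  simp

theorem pvMain (ranks : List Int) (w L : Int)
    (hw : (ranks.length : Int) = w) (hpos : 0 < w) :
    pvATail ranks w L =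
      PySem.List.sorted (PySem.List.pyRange 0 L 1) (fun p => pvKey ranks w L p) := by
  rw [pvATail_eq_flatMap ranks w L]
  have hw0 : w ≠ 0 := ne_of_gt hpos
  set D := (PySem.List.enumerate ranks).foldl pvStep PySem.Dict.empty with hD
  set SK := PySem.List.sorted D.keys (fun r => r) with hSK
  set nr := PySem.Int.floordiv (L + w - 1) w with hnr
  -- SK facts
  have hSKmem : ∀ r : Int, r ∈ SK ↔ r ∈ ranks := by
    intro r
    rw [hSK, PySem.List.mem_sorted, hD, pvFold_keys_mem]
    simp [PySem.List.map_snd_enumerate]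
  have hSKnodup : SK.Nodup := by
    exact (PySem.List.sorted_perm D.keys (fun r => r) false).symm.nodup
      (pvFold_keys_nodup _ _ (by simp))
  have hSKlt : SK.Pairwise (· < ·) := by
    have hle := PySem.List.sorted_pairwise D.keys (fun r => r)
    refine (hle.and hSKnodup).imp ?_
    rintro a b ⟨h1, h2⟩
    exact lt_of_le_of_ne h1 h2
  -- T pairwise under key
  have hpair : (SK.flatMap (fun r => pvBlock w L nr (pvCols ranks r))).Pairwise
      (fun a b => pvKey ranks w L a < pvKey ranks w L b) := by
    rw [List.pairwise_flatMap]
    constructor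
    · intro r _
      refine List.Pairwise.imp_of_mem ?_ (pvBlock_pairwise ranks w L nr r hw hpos)
      intro a b ha hb hab
      rw [hnr] at ha hb
      obtain ⟨ha0, haL, har⟩ := (pvBlock_mem ranks w L r a hw hpos).mp ha
      obtain ⟨hb0, hbL, hbr⟩ := (pvBlock_mem ranks w L r b hw hpos).mp hb
      unfold pvKey
      rw [har, hbr]
      omega
    · refine List.Pairwise.imp_of_mem ?_ hSKlt
      intro r1 r2 _ _ hlt x hx y hy
      rw [hnr] at hx hy
      obtain ⟨hx0, hxL, hxr⟩ := (pvBlock_mem ranks w L r1 x hw hpos).mp hx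
      obtain ⟨hy0, hyL, hyr⟩ := (pvBlock_mem ranks w L r2 y hw hpos).mp hy
      unfold pvKey
      rw [hxr, hyr]
      have hL0 : 0 < L := lt_of_le_of_lt hx0 hxL
      nlinarith
  -- perm
  have hperm : (SK.flatMap (fun r => pvBlock w L nr (pvCols ranks r))).Perm
      (PySem.List.pyRange 0 L 1) := by
    apply List.perm_of_nodup_nodup_toFinset_eq
    · exact hpair.imp (fun h => by intro he; rw [he] at h; exact lt_irrefl _ h)
    · exact List.Pairwise.imp ne_of_lt (pvRange_pairwise L)
    · ext q
      simp only [List.mem_toFinset, List.mem_flatMap, PySem.List.mem_pyRange_one]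
      constructor
      · rintro ⟨r, hr, hq⟩
        rw [hnr] at hq
        obtain ⟨h0, hL, _⟩ := (pvBlock_mem ranks w L r q hw hpos).mp hq
        exact ⟨h0, hL⟩
      · rintro ⟨h0, hL⟩
        refine ⟨PySem.List.pyGetD ranks (PySem.Int.mod q w) 0, ?_, ?_⟩
        · rw [hSKmem]
          have hm0 : 0 ≤ PySem.Int.mod q w := by
            rw [PySem.Int.mod_eq_emod_of_pos hpos]; exact Int.emod_nonneg q hw0
          have hmw : PySem.Int.mod q w < w := by
            rw [PySem.Int.mod_eq_emod_of_pos hpos]; exact Int.emod_lt_of_pos q hpos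
          rw [PySem.List.pyGetD_of_nonneg _ _ hm0]
          have hlen : (PySem.Int.mod q w).toNat < ranks.length := by omega
          rw [List.getD_eq_getElem ranks 0 hlen]
          exact List.getElem_mem hlen
        · rw [hnr]
          exact (pvBlock_mem ranks w L _ q hw hpos).mpr ⟨h0, hL, rfl⟩
  exact (PySem.List.sorted_eq_of_perm_of_pairwise_lt _ _ _ hperm hpair).symm

-- ===== VERDICT (by name: the statement is the Claim_ definition above) =====
theorem myszkowski_perm_spec : Claim_equal_myszkowski_perm := by
  intro keyword text_len _ hpre
  unfold Spec_myszkowski_perm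
  rw [pvA_eq, pvB_eq]
  apply pvMain
  · simp [pvRanks, PySem.Str.len_eq]
  · have hne : keyword.toList ≠ [] := fun h => hpre (String.toList_eq_nil_iff.mp h)
    rw [PySem.Str.len_eq]
    exact_mod_cast List.length_pos_iff.mpr hne
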